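-- pv_equiv track=rewrite | github.com/m3360202/mogiAi-ios-backend | app/services/video_evaluator.py | _pick_sentence_by_keywords
-- ===== SOURCE A (Python) =====
-- from typing import Any, Dict, List, Optional, Tuple
--
-- def _pick_sentence_by_keywords(sentences: List[str], kws: List[str]) -> int:
--     """根据关键词选择最佳句子索引"""
--     if not sentences:
--         return -1
--     best_i, best_cnt = -1, 0
--     for i, s in enumerate(sentences):
--         c = sum(s.count(k) for k in kws)
--         if c > best_cnt:
--             best_cnt, best_i = c, i
--     return best_i
-- ===== SOURCE B (Python) =====
-- from typing import List
--
-- def _pick_sentence_by_keywords(sentences: List[str], kws: List[str]) -> int: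
--     # Transposed traversal: accumulate per-sentence totals keyword by keyword,
--     # then a right-to-left scan (>= replaces >) lands on the first maximal index.
--     counts = [0] * len(sentences)
--     for k in kws:
--         counts = [c + s.count(k) for c, s in zip(counts, sentences)]
--     best_i, best_cnt = -1, 0
--     for i in range(len(sentences) - 1, -1, -1):
--         if counts[i] > 0 and counts[i] >= best_cnt:
--             best_i, best_cnt = i, counts[i]
--     return best_i
-- ===== Notes on version B (the rewrite author's own statement) =====
-- stated objective: alternative
-- what changed: B transposes the traversal (outer loop over keywords accumulating into a counts table instead of per-sentence summing) and replaces the forward running-best with a backward right-to-left scan using >= so the leftmost maximum survives.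
import Mathlib
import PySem

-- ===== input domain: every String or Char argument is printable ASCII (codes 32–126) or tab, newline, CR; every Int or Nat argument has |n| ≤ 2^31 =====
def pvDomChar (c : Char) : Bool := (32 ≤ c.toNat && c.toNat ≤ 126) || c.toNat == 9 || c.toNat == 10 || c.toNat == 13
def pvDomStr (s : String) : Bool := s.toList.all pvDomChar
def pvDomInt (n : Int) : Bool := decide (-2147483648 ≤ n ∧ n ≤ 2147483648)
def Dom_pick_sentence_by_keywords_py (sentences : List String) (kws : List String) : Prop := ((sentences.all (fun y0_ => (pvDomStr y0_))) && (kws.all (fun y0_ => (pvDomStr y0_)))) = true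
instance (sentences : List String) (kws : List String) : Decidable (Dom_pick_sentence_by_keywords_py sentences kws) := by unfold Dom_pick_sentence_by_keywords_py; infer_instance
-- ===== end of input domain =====

-- B transposes the traversal (outer loop over keywords filling a counts table) and picks the
-- answer by a backward right-to-left scan with >=; same return value (objective: alternative).

-- ===== PORT A =====
-- c = sum(s.count(k) for k in kws)
def pvKwCount (kws : List String) (s : String) : Int :=
  (kws.map (fun k => (PySem.Str.count s k : Int))).sum

def pick_sentence_by_keywords_py (sentences : List String) (kws : List String) : Int :=
  if sentences = [] then -1
  else
    let r := (PySem.List.enumerate sentences 0).foldl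
      (fun (b : Int × Int) p =>
        let c := pvKwCount kws p.2
        if c > b.2 then (p.1, c) else b)
      (-1, 0)
    r.1

-- ===== PORT B =====
-- counts = [0]*len(sentences); for k in kws: for i,s in enumerate(sentences): counts[i] += s.count(k)
-- then a backward scan over the enumerated counts (foldr = right-to-left loop) with `>=`.
def pick_sentence_by_keywords_py_alt (sentences : List String) (kws : List String) : Int :=
  let counts := kws.foldl
    (fun (acc : List Int) k => (acc.zip sentences).map (fun p => p.1 + (PySem.Str.count p.2 k : Int)))
    (List.replicate sentences.length (0 : Int))
  let r := (PySem.List.enumerate counts 0).foldr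
    (fun p (b : Int × Int) => if p.2 > 0 ∧ p.2 ≥ b.2 then (p.1, p.2) else b)
    (-1, 0)
  r.1

-- ===== PRECONDITION & SPEC =====
def Spec_pick_sentence_by_keywords_py (sentences : List String) (kws : List String) (out : Int) : Prop := out = pick_sentence_by_keywords_py_alt sentences kws
instance (sentences : List String) (kws : List String) (out : Int) : Decidable (Spec_pick_sentence_by_keywords_py sentences kws out) := by unfold Spec_pick_sentence_by_keywords_py; infer_instance

-- ===== CLAIM =====
def Claim_equal_pick_sentence_by_keywords_py : Prop := ∀ (sentences : List String) (kws : List String), Dom_pick_sentence_by_keywords_py sentences kws → Spec_pick_sentence_by_keywords_py sentences kws (pick_sentence_by_keywords_py sentences kws)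

-- ===== LEMMAS AND PROOFS =====

-- A's running-best fold computes: the running max M over cs (from bc), and s + first index of M when it improves on bc.
theorem fold_argmax (cs : List Int) (s bi bc : Int) :
    (PySem.List.enumerate cs s).foldl (fun (b : Int × Int) p => if p.2 > b.2 then (p.1, p.2) else b) (bi, bc)
      = if bc < cs.foldl max bc
          then (s + ((PySem.List.index? cs (cs.foldl max bc)).getD 0 : Int), cs.foldl max bc)
          else (bi, bc) := by
  induction cs generalizing s bi bc with
  | nil => simp [PySem.List.enumerate_nil]
  | cons c t ih =>
    rw [PySem.List.enumerate_cons, List.foldl_cons, List.foldl_cons]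
    by_cases hc : c > bc
    · rw [if_pos hc]
      rw [ih]
      have hmaxc : max bc c = c := by omega
      rw [hmaxc]
      have hle : c ≤ t.foldl max c := (PySem.List.le_foldl_max t c).1
      have hmem : t.foldl max c = c ∨ t.foldl max c ∈ t := PySem.List.foldl_max_mem t c
      by_cases h2 : c < t.foldl max c
      · have hbc : bc < t.foldl max c := lt_trans hc h2
        simp only [h2, if_pos, hbc]
        have hne : c ≠ t.foldl max c := ne_of_lt h2
        rw [PySem.List.index?_cons_of_ne t hne]
        have hmemt : t.foldl max c ∈ t := by
          rcases hmem with h | h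
          · omega
          · exact h
        rcases (PySem.List.index?_isSome_iff t (t.foldl max c)).2 hmemt |> Option.isSome_iff_exists.1 with ⟨j, hj⟩
        rw [hj]
        simp only [Option.map_some, Option.getD_some]
        push_cast
        ring_nf
      · have heq : t.foldl max c = c := le_antisymm (by omega) hle
        rw [heq]
        simp only [hc, if_pos]
        rw [PySem.List.index?_cons_self]
        simp
    · rw [if_neg hc]
      have hcle : c ≤ bc := not_lt.1 hc
      rw [ih]
      have hmaxc : max bc c = bc := by omega
      rw [hmaxc]
      by_cases h2 : bc < t.foldl max bc
      · simp only [h2, if_pos]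
        have hne : c ≠ t.foldl max bc := by omega
        rw [PySem.List.index?_cons_of_ne t hne]
        have hmem : t.foldl max bc = bc ∨ t.foldl max bc ∈ t := PySem.List.foldl_max_mem t bc
        have hmemt : t.foldl max bc ∈ t := by
          rcases hmem with h | h
          · omega
          · exact h
        rcases (PySem.List.index?_isSome_iff t (t.foldl max bc)).2 hmemt |> Option.isSome_iff_exists.1 with ⟨j, hj⟩
        rw [hj]
        simp only [Option.map_some, Option.getD_some]
        push_cast
        ring_nf
      · simp [h2]

-- A's fold over enumerated sentences equals the same fold over the enumerated counts table.
theorem fold_map (f : String → Int) (xs : List String) (s : Int) (init : Int × Int) :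
    (PySem.List.enumerate xs s).foldl (fun (b : Int × Int) p => if f p.2 > b.2 then (p.1, f p.2) else b) init
  = (PySem.List.enumerate (xs.map f) s).foldl (fun (b : Int × Int) p => if p.2 > b.2 then (p.1, p.2) else b) init := by
  induction xs generalizing s init with
  | nil => simp [PySem.List.enumerate_nil]
  | cons x t ih => simp [PySem.List.enumerate_cons, List.foldl_cons, ih]

theorem zip_map_count (k : String) (acc : List Int) (ss : List String) :
    (acc.zip ss).map (fun p => p.1 + (PySem.Str.count p.2 k : Int))
      = List.zipWith (fun a s => a + (PySem.Str.count s k : Int)) acc ss := by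
  induction acc generalizing ss with
  | nil => simp
  | cons a t ih => cases ss with
    | nil => simp
    | cons s st =>
      simp only [List.zip_cons_cons, List.map_cons, List.zipWith_cons_cons]
      exact congrArg (List.cons _) (ih st)

theorem zipWith_absorb (f g : Int → String → Int) (acc : List Int) (ss : List String) :
    List.zipWith f (List.zipWith g acc ss) ss = List.zipWith (fun a s => f (g a s) s) acc ss := by
  induction acc generalizing ss with
  | nil => simp
  | cons a t ih => cases ss with
    | nil => simp
    | cons s st => simp [ih]

-- the transposed keyword loop computes pointwise keyword totals
theorem transposed (ss : List String) (ks : List String) (acc : List Int) (h : acc.length = ss.length) :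
    ks.foldl (fun (acc : List Int) k => (acc.zip ss).map (fun p => p.1 + (PySem.Str.count p.2 k : Int))) acc
      = List.zipWith (fun a s => a + pvKwCount ks s) acc ss := by
  induction ks generalizing acc with
  | nil =>
    simp only [List.foldl_nil, pvKwCount, List.map_nil, List.sum_nil]
    rw [show (fun (a : Int) (s : String) => a + (0:Int)) = fun a _ => a by funext a s; ring]
    induction acc generalizing ss with
    | nil => simp
    | cons a t ih =>
      cases ss with
      | nil => simp at h
      | cons s st =>
        simp only [List.zipWith_cons_cons, List.cons.injEq]
        exact ⟨trivial, ih st (by simpa using h)⟩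
  | cons k kt ih =>
    rw [List.foldl_cons, ih _ (by simp [h]), zip_map_count, zipWith_absorb]
    congr 1
    funext a s
    simp [pvKwCount]
    ring

theorem zipWith_replicate_zero (F : String → Int) (ss : List String) :
    List.zipWith (fun a s => a + F s) (List.replicate ss.length (0 : Int)) ss = ss.map F := by
  induction ss with
  | nil => simp
  | cons s st ih => simp [List.replicate_succ, ih]

theorem foldl_max_shift (a b : Int) (l : List Int) : l.foldl max (max a b) = max a (l.foldl max b) := by
  induction l generalizing b with
  | nil => simp
  | cons c t ih =>
    simp only [List.foldl_cons]
    rw [max_assoc, ih]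

-- B's backward >= scan lands on the first index of the positive maximum.
theorem foldr_argmax (cs : List Int) (u : Int) :
    (PySem.List.enumerate cs u).foldr
        (fun p (b : Int × Int) => if p.2 > 0 ∧ p.2 ≥ b.2 then (p.1, p.2) else b) (-1, 0)
      = if 0 < cs.foldl max 0
          then (u + ((PySem.List.index? cs (cs.foldl max 0)).getD 0 : Int), cs.foldl max 0)
          else (-1, 0) := by
  induction cs generalizing u with
  | nil => simp [PySem.List.enumerate_nil]
  | cons c t ih =>
    rw [PySem.List.enumerate_cons, List.foldr_cons, ih (u + 1)]
    have hM : (c :: t).foldl max 0 = max c (t.foldl max 0) := by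
      rw [List.foldl_cons, max_comm 0 c, foldl_max_shift]
    have hMt0 : 0 ≤ t.foldl max 0 := (PySem.List.le_foldl_max t 0).1
    rw [hM]
    by_cases h2 : 0 < t.foldl max 0
    · rw [if_pos h2]
      by_cases hcond : c > 0 ∧ c ≥ t.foldl max 0
      · have hmax : max c (t.foldl max 0) = c := by omega
        rw [hmax]
        simp only [gt_iff_lt, ge_iff_le, if_pos (show 0 < c ∧ t.foldl max 0 ≤ c by omega)]
        rw [if_pos (by omega : (0:Int) < c), PySem.List.index?_cons_self]
        simp
      · have hclt : c < t.foldl max 0 := by omega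
        have hmax : max c (t.foldl max 0) = t.foldl max 0 := by omega
        rw [hmax]
        simp only [gt_iff_lt, ge_iff_le,
          if_neg (show ¬ (0 < c ∧ t.foldl max 0 ≤ c) by omega)]
        rw [if_pos h2]
        have hne : c ≠ t.foldl max 0 := by omega
        rw [PySem.List.index?_cons_of_ne t hne]
        have hmemt : t.foldl max 0 ∈ t := by
          rcases PySem.List.foldl_max_mem t 0 with h | h
          · omega
          · exact h
        rcases (PySem.List.index?_isSome_iff t (t.foldl max 0)).2 hmemt |> Option.isSome_iff_exists.1 with ⟨j, hj⟩
        rw [hj]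
        simp only [Option.map_some, Option.getD_some]
        push_cast
        ring_nf
    · rw [if_neg h2]
      have hMt : t.foldl max 0 = 0 := by omega
      rw [hMt]
      by_cases hc : 0 < c
      · have hmax : max c (0:Int) = c := by omega
        rw [hmax]
        simp only [gt_iff_lt, ge_iff_le, if_pos (show 0 < c ∧ (0:Int) ≤ c by omega)]
        rw [if_pos hc, PySem.List.index?_cons_self]
        simp
      · have hmax : max c (0:Int) = 0 := by omega
        rw [hmax]
        simp only [gt_iff_lt, ge_iff_le, if_neg (show ¬ (0 < c ∧ (0:Int) ≤ c) by omega)]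
        rw [if_neg (by omega : ¬ (0:Int) < 0)]

-- ===== VERDICT =====
theorem pick_sentence_by_keywords_py_spec : Claim_equal_pick_sentence_by_keywords_py := by
  unfold Claim_equal_pick_sentence_by_keywords_py
  intro sentences kws _
  unfold Spec_pick_sentence_by_keywords_py
  unfold pick_sentence_by_keywords_py pick_sentence_by_keywords_py_alt
  simp only []
  rw [transposed sentences kws _ (by simp), zipWith_replicate_zero, foldr_argmax]
  cases sentences with
  | nil =>
    simp
  | cons x rest =>
    rw [if_neg (List.cons_ne_nil x rest)]
    rw [fold_map (pvKwCount kws), fold_argmax]
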